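-- pv_equiv track=rewrite | github.com/sugamavid/KH | parse_full_bylaws.py | parse_subsections
-- ===== SOURCE A (Python) =====
-- def parse_subsections(section_content, section_num):
--     """Parse subsections within a section"""
--     subsections = []
--
--     # Pattern to match subsection titles (lines that are not indented and end with a colon or are title-cased)
--     lines = section_content.split('\n')
--
--     current_subsection = None
--     current_content = []
--     subsection_counter = 1
--
--     for line in lines:
--         line_stripped = line.strip()
--
--         if not line_stripped:
--             continue
--
--         # Check if this is a subsection title (title-cased, short, no full sentences)
--         is_title = (
--             line_stripped and
--             len(line_stripped) < 100 and
--             line_stripped[0].isupper() and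
--             not line_stripped.endswith('.') and
--             ':' in line_stripped[-20:] or
--             (line_stripped[0].isupper() and len(line_stripped.split()) <= 8 and not line_stripped.endswith(','))
--         )
--
--         if is_title and not line_stripped.endswith(','):
--             # Save previous subsection
--             if current_subsection:
--                 subsections.append({
--                     'number': f'{section_num}.{subsection_counter}',
--                     'title': current_subsection,
--                     'content': '\n'.join(current_content).strip()
--                 })
--                 subsection_counter += 1
--
--             # Start new subsection
--             current_subsection = line_stripped.rstrip(':')
--             current_content = []
--         else:
--             # Add to current subsection content
--             if current_subsection:
--                 current_content.append(line_stripped)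
--
--     # Save last subsection
--     if current_subsection:
--         subsections.append({
--             'number': f'{section_num}.{subsection_counter}',
--             'title': current_subsection,
--             'content': '\n'.join(current_content).strip()
--         })
--
--     return subsections
-- ===== SOURCE B (Python) =====
-- def _is_title(ls):
--     # exact reproduction of A's title test (same precedence) plus the comma guard
--     return bool(
--         (len(ls) < 100 and ls[0].isupper() and not ls.endswith('.')
--          and ':' in ls[-20:])
--         or (ls[0].isupper() and len(ls.split()) <= 8 and not ls.endswith(','))
--     ) and not ls.endswith(',')
--
--
-- def parse_subsections(section_content, section_num):
--     """Parse subsections by scanning from one title boundary to the next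
--     and slicing the body out, instead of a line-by-line stateful flush loop."""
--     lines = [ls for ls in map(str.strip, section_content.split('\n')) if ls]
--     n = len(lines)
--     i = 0
--     while i < n and not _is_title(lines[i]):
--         i += 1                    # prologue before the first title is dropped
--     out = []
--     while i < n:
--         j = i + 1
--         while j < n and not _is_title(lines[j]):
--             j += 1                # j = next title boundary (or end)
--         out.append({'number': f'{section_num}.{len(out) + 1}',
--                     'title': lines[i].rstrip(':'),
--                     'content': '\n'.join(lines[i + 1:j]).strip()})
--         i = j
--     return out
-- ===== Notes on version B (the rewrite author's own statement) =====
-- stated objective: alternative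
-- what changed: A's single stateful line-by-line loop (current title/content accumulator with deferred flush) is replaced by a boundary-scan: advance an index from one title line to the next and slice the body lines[i+1:j] out between consecutive boundaries, formatting each record immediately with its number taken from len(out)+1.
import Mathlib
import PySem

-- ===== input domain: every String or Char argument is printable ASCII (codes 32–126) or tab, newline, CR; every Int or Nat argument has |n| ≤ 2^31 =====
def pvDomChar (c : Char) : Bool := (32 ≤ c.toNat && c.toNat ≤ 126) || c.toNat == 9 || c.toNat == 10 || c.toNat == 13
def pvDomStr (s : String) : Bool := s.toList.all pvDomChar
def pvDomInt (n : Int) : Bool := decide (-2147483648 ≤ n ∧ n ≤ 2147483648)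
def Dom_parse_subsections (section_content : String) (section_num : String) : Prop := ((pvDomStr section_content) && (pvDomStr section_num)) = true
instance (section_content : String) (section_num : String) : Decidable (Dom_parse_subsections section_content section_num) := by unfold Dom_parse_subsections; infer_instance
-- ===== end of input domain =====

-- B replaces A's single stateful flush loop by a boundary scan: advance an index from one
-- title line to the next and slice the body out between consecutive boundaries
-- (objective: alternative; same cost).

-- ===== PORT A =====
-- exact: Python's s.rstrip(':') drops trailing ':' characters
def pvA_rstripColon (s : String) : String :=
  String.ofList ((s.toList.reverse.dropWhile (fun c => c == ':')).reverse)

-- the dict literal {'number': …, 'title': …, 'content': '\n'.join(content).strip()}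
def pvA_mk (section_num : String) (counter : Int) (title : String) (content : List String) :
    List (String × String) :=
  [("number", section_num ++ "." ++ PySem.Int.toStr counter),
   ("title", title),
   ("content", PySem.Str.strip (PySem.Str.join "\n" content))]

-- one iteration of A's for-loop; state = (subsections, current_subsection, current_content, subsection_counter).
-- 'if current_subsection:' is ported as the Option match: current_subsection is None or a string whose
-- first character is an uppercase letter (set from a title line), hence never ''.
def pvA_step (section_num : String)
    (st : List (List (String × String)) × Option String × List String × Int) (line : String) :
    List (List (String × String)) × Option String × List String × Int :=
  let (subs, cur, content, counter) := st
  let ls := PySem.Str.strip line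
  if ls == "" then st
  else
    let is_title :=
      (!(ls == "") && decide (PySem.Str.len ls < 100) &&
         (PySem.Str.pyGet? ls 0).any PySem.Chars.isupper &&
         !(PySem.Str.endswith ls ".") &&
         PySem.Str.isIn ":" (PySem.Str.slice ls (some (-20)) none))
      || ((PySem.Str.pyGet? ls 0).any PySem.Chars.isupper &&
          decide ((PySem.Str.split₀ ls).length ≤ 8) &&
          !(PySem.Str.endswith ls ","))
    if is_title && !(PySem.Str.endswith ls ",") then
      match cur with
      | some t => (subs ++ [pvA_mk section_num counter t content],
                   some (pvA_rstripColon ls), [], counter + 1)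
      | none => (subs, some (pvA_rstripColon ls), ([] : List String), counter)
    else
      match cur with
      | some _ => (subs, cur, content ++ [ls], counter)
      | none => st

def parse_subsections (section_content : String) (section_num : String) :
    List (List (String × String)) :=
  let lines := ((PySem.Str.split? section_content "\n").getD [])
  let st := lines.foldl (pvA_step section_num) ([], none, [], 1)
  match st.2.1 with
  | some t => st.1 ++ [pvA_mk section_num st.2.2.2 t st.2.2.1]
  | none => st.1

-- ===== PORT B =====
-- B's _is_title: A's title expression (same precedence) folded with the comma guard
def pvB_isTitle (ls : String) : Bool :=
  ((decide (PySem.Str.len ls < 100) &&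
      (PySem.Str.pyGet? ls 0).any PySem.Chars.isupper &&
      !(PySem.Str.endswith ls ".") &&
      PySem.Str.isIn ":" (PySem.Str.slice ls (some (-20)) none))
    || ((PySem.Str.pyGet? ls 0).any PySem.Chars.isupper &&
        decide ((PySem.Str.split₀ ls).length ≤ 8) &&
        !(PySem.Str.endswith ls ",")))
  && !(PySem.Str.endswith ls ",")

-- exact: Python's s.rstrip(':')
def pvB_rstripColon (s : String) : String :=
  String.ofList ((s.toList.reverse.dropWhile (fun c => c == ':')).reverse)

-- the non-empty stripped lines
def pvB_lines (section_content : String) : List String :=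
  ((((PySem.Str.split? section_content "\n").getD [])).map PySem.Str.strip).filter (fun ls => !(ls == ""))

-- the inner 'while … and not _is_title(lines[k]): k += 1' scans: first title index ≥ i (or n)
def pvB_skip (lines : List String) (i : Nat) : Nat :=
  if h : i < lines.length then
    if pvB_isTitle lines[i] then i else pvB_skip lines (i + 1)
  else i
termination_by lines.length - i
decreasing_by omega

-- needed by pvB_loop's termination argument
theorem pvB_skip_ge (lines : List String) (i : Nat) : i ≤ pvB_skip lines i := by
  unfold pvB_skip
  split
  · split
    · exact Nat.le_refl _
    · exact Nat.le_trans (Nat.le_succ i) (pvB_skip_ge lines (i + 1))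
  · exact Nat.le_refl _
termination_by lines.length - i

-- the outer 'while i < n' loop: one record per boundary pair, i jumps to the next title
def pvB_loop (lines : List String) (section_num : String) (i : Nat)
    (out : List (List (String × String))) : List (List (String × String)) :=
  if h : i < lines.length then
    let j := pvB_skip lines (i + 1)
    pvB_loop lines section_num j
      (out ++ [[("number", section_num ++ "." ++ PySem.Int.toStr ((out.length : Int) + 1)),
                ("title", pvB_rstripColon lines[i]),
                ("content", PySem.Str.strip (PySem.Str.join "\n"
                    (PySem.List.slice lines (some ((i : Int) + 1)) (some (j : Int)))))]])
  else out
termination_by lines.length - i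
decreasing_by have := pvB_skip_ge lines (i + 1); omega

def parse_subsections_alt (section_content : String) (section_num : String) :
    List (List (String × String)) :=
  let lines := pvB_lines section_content
  pvB_loop lines section_num (pvB_skip lines 0) []

-- ===== PRECONDITION & SPEC =====
def Spec_parse_subsections (section_content : String) (section_num : String) (out : List (List (String × String))) : Prop := out = parse_subsections_alt section_content section_num
instance (section_content : String) (section_num : String) (out : List (List (String × String))) : Decidable (Spec_parse_subsections section_content section_num out) := by unfold Spec_parse_subsections; infer_instance

-- ===== CLAIM (what is proved, stated in full; the proofs are below) =====
def Claim_equal_parse_subsections : Prop := ∀ (section_content : String) (section_num : String), Dom_parse_subsections section_content section_num → Spec_parse_subsections section_content section_num (parse_subsections section_content section_num)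

-- ===== LEMMAS AND PROOFS =====

-- the common intermediate decomposition: (title, body) chunks of the stripped line list,
-- built back-to-front (the second component is the pending body before the next title; it
-- is discarded at the top, so lines before the first title vanish)
def pvAux (lines : List String) : List (String × List String) × List String :=
  lines.foldr
    (fun l acc => if pvB_isTitle l then ((l, acc.2) :: acc.1, []) else (acc.1, l :: acc.2))
    ([], [])

def pvChunks (lines : List String) : List (String × List String) := (pvAux lines).1

-- render chunks as records, numbering from k
def pvRender (section_num : String) (k : Int) : List (String × List String) → List (List (String × String))
  | [] => []
  | (t, b) :: cs => pvA_mk section_num k (pvB_rstripColon t) b :: pvRender section_num (k + 1) cs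

-- A's final flush
def pvFinish (section_num : String)
    (st : List (List (String × String)) × Option String × List String × Int) :
    List (List (String × String)) :=
  match st.2.1 with
  | some t => st.1 ++ [pvA_mk section_num st.2.2.2 t st.2.2.1]
  | none => st.1

-- A's step on an already-stripped non-empty line
def pvStep (section_num : String)
    (st : List (List (String × String)) × Option String × List String × Int) (ls : String) :
    List (List (String × String)) × Option String × List String × Int :=
  let (subs, cur, content, counter) := st
  if pvB_isTitle ls then
    match cur with
    | some t => (subs ++ [pvA_mk section_num counter t content],
                 some (pvB_rstripColon ls), [], counter + 1)
    | none => (subs, some (pvB_rstripColon ls), ([] : List String), counter)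
  else
    match cur with
    | some _ => (subs, cur, content ++ [ls], counter)
    | none => st

theorem pvRstrip_eq : pvA_rstripColon = pvB_rstripColon := rfl

theorem pvAux_snd (lines : List String) :
    (pvAux lines).2 = lines.takeWhile (fun x => !pvB_isTitle x) := by
  induction lines with
  | nil => rfl
  | cons l rest ih =>
    by_cases ht : pvB_isTitle l = true
    · simp [pvAux, List.foldr_cons, ht]
    · simp only [pvAux, List.foldr_cons] at *
      simp [ht, ih]

theorem pvChunks_cons_title (l : String) (rest : List String) (ht : pvB_isTitle l = true) :
    pvChunks (l :: rest) = (l, rest.takeWhile (fun x => !pvB_isTitle x)) :: pvChunks rest := by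
  simp [pvChunks, pvAux, List.foldr_cons, ht, ← pvAux_snd]

theorem pvChunks_cons_not (l : String) (rest : List String) (ht : ¬ pvB_isTitle l = true) :
    pvChunks (l :: rest) = pvChunks rest := by
  simp [pvChunks, pvAux, List.foldr_cons, ht]

theorem pvChunks_dropWhile (lines : List String) :
    pvChunks (lines.dropWhile (fun x => !pvB_isTitle x)) = pvChunks lines := by
  induction lines with
  | nil => rfl
  | cons l rest ih =>
    by_cases ht : pvB_isTitle l = true
    · simp [ht]
    · rw [List.dropWhile_cons]
      simp only [ht, Bool.not_false, if_true]
      rw [ih, pvChunks_cons_not l rest ht]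

theorem pvA_step_char (sn : String)
    (st : List (List (String × String)) × Option String × List String × Int) (line : String)
    (hls : (PySem.Str.strip line == "") = false) :
    pvA_step sn st line = pvStep sn st (PySem.Str.strip line) := by
  obtain ⟨subs, cur, content, counter⟩ := st
  simp only [pvA_step, pvStep, pvB_isTitle, hls, Bool.not_false, Bool.true_and,
    Bool.false_eq_true, if_false, ← pvRstrip_eq]

theorem pvFold_raw (sn : String) (raw : List String)
    (st : List (List (String × String)) × Option String × List String × Int) :
    raw.foldl (pvA_step sn) st
      = (((raw.map PySem.Str.strip).filter (fun ls => !(ls == ""))).foldl (pvStep sn) st) := by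
  induction raw generalizing st with
  | nil => rfl
  | cons l rest ih =>
    simp only [List.foldl_cons, List.map_cons, List.filter_cons]
    by_cases h : (PySem.Str.strip l == "") = true
    · have h1 : pvA_step sn st l = st := by
        obtain ⟨subs, cur, content, counter⟩ := st
        simp [pvA_step, h]
      rw [h1, ih]
      simp [h]
    · have h' : (PySem.Str.strip l == "") = false := by simpa using h
      rw [pvA_step_char sn st l h', ih]
      simp [h']

theorem pvFold_some (sn : String) (xs : List String) :
    ∀ (subs : List (List (String × String))) (t : String) (content : List String) (counter : Int),
    pvFinish sn (xs.foldl (pvStep sn) (subs, some t, content, counter))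
      = subs ++ pvA_mk sn counter t (content ++ xs.takeWhile (fun x => !pvB_isTitle x))
          :: pvRender sn (counter + 1) (pvChunks xs) := by
  induction xs with
  | nil => intro subs t content counter; simp [pvFinish, pvChunks, pvAux, pvRender]
  | cons l rest ih =>
    intro subs t content counter
    by_cases ht : pvB_isTitle l = true
    · have hstep : pvStep sn (subs, some t, content, counter) l
          = (subs ++ [pvA_mk sn counter t content], some (pvB_rstripColon l), [], counter + 1) := by
        simp [pvStep, ht]
      rw [List.foldl_cons, hstep, ih, pvChunks_cons_title l rest ht]
      simp [ht, pvRender]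
    · have hstep : pvStep sn (subs, some t, content, counter) l
          = (subs, some t, content ++ [l], counter) := by
        simp [pvStep, ht]
      rw [List.foldl_cons, hstep, ih, pvChunks_cons_not l rest ht]
      simp [ht]

theorem pvFold_none (sn : String) (xs : List String) :
    ∀ (subs : List (List (String × String))) (counter : Int),
    pvFinish sn (xs.foldl (pvStep sn) (subs, none, [], counter))
      = subs ++ pvRender sn counter (pvChunks xs) := by
  induction xs with
  | nil => intro subs counter; simp [pvFinish, pvChunks, pvAux, pvRender]
  | cons l rest ih =>
    intro subs counter
    by_cases ht : pvB_isTitle l = true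
    · have hstep : pvStep sn (subs, none, [], counter) l
          = (subs, some (pvB_rstripColon l), ([] : List String), counter) := by
        simp [pvStep, ht]
      rw [List.foldl_cons, hstep, pvFold_some, pvChunks_cons_title l rest ht]
      simp [pvRender]
    · have hstep : pvStep sn (subs, none, [], counter) l = (subs, none, [], counter) := by
        simp [pvStep, ht]
      rw [List.foldl_cons, hstep, ih, pvChunks_cons_not l rest ht]

theorem pvTakeWhile_len_le (l : List String) (p : String → Bool) :
    (l.takeWhile p).length ≤ l.length :=
  (List.takeWhile_sublist p).length_le

theorem pvTake_takeWhile (l : List String) (p : String → Bool) :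
    l.take (l.takeWhile p).length = l.takeWhile p := by
  induction l with
  | nil => rfl
  | cons a t ih =>
    by_cases h : p a = true
    · simp [h, ih]
    · simp [h]

theorem pvDrop_takeWhile (l : List String) (p : String → Bool) :
    l.drop (l.takeWhile p).length = l.dropWhile p := by
  induction l with
  | nil => rfl
  | cons a t ih =>
    by_cases h : p a = true
    · simp [h, ih]
    · simp [h]

theorem pvB_skip_eq (lines : List String) (i : Nat) :
    pvB_skip lines i = i + ((lines.drop i).takeWhile (fun x => !pvB_isTitle x)).length := by
  unfold pvB_skip
  split
  · rename_i h
    rw [List.drop_eq_getElem_cons h]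
    split
    · rename_i ht
      simp [ht]
    · rename_i ht
      rw [pvB_skip_eq lines (i + 1)]
      simp only [List.takeWhile_cons]
      simp [ht]
      omega
  · rename_i h
    rw [List.drop_eq_nil_of_le (by omega)]
    simp
termination_by lines.length - i

theorem pvB_skip_drop (lines : List String) (i : Nat) :
    lines.drop (pvB_skip lines i) = (lines.drop i).dropWhile (fun x => !pvB_isTitle x) := by
  rw [pvB_skip_eq, ← List.drop_drop, pvDrop_takeWhile]

theorem pvB_skip_title (lines : List String) (i : Nat) (h : pvB_skip lines i < lines.length) :
    pvB_isTitle (lines[pvB_skip lines i]'h) = true := by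
  have hd := pvB_skip_drop lines i
  have h1 : lines.drop (pvB_skip lines i) = lines[pvB_skip lines i] :: lines.drop (pvB_skip lines i + 1) :=
    List.drop_eq_getElem_cons h
  rcases he : (lines.drop i).dropWhile (fun x => !pvB_isTitle x) with _ | ⟨a, rest⟩
  · rw [he] at hd; rw [hd] at h1; cases h1
  · have ha : (!pvB_isTitle a) = false := by
      have := List.head?_dropWhile_not (p := fun x => !pvB_isTitle x) (l := lines.drop i)
      rw [he] at this; simpa using this
    rw [he] at hd; rw [hd] at h1
    cases h1
    simpa using ha

theorem pvLoop_eq (lines : List String) (sn : String) (i : Nat)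
    (out : List (List (String × String))) (hle : i ≤ lines.length)
    (hti : ∀ h : i < lines.length, pvB_isTitle (lines[i]'h) = true) :
    pvB_loop lines sn i out
      = out ++ pvRender sn ((out.length : Int) + 1) (pvChunks (lines.drop i)) := by
  unfold pvB_loop
  split
  · rename_i h
    have ht := hti h
    have hdrop : lines.drop i = lines[i] :: lines.drop (i + 1) := List.drop_eq_getElem_cons h
    have hslice : PySem.List.slice lines (some ((i : Int) + 1)) (some ((pvB_skip lines (i + 1) : Nat) : Int))
        = (lines.drop (i + 1)).takeWhile (fun x => !pvB_isTitle x) := by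
      have hc : ((i : Int) + 1) = (((i + 1 : Nat) : Int)) := by push_cast; ring
      rw [hc, PySem.List.slice_natCast, pvB_skip_eq]
      have h2 : i + 1 + ((lines.drop (i + 1)).takeWhile (fun x => !pvB_isTitle x)).length - (i + 1)
          = ((lines.drop (i + 1)).takeWhile (fun x => !pvB_isTitle x)).length := by omega
      rw [h2, pvTake_takeWhile]
    have hrec := pvLoop_eq lines sn (pvB_skip lines (i + 1))
        (out ++ [[("number", sn ++ "." ++ PySem.Int.toStr ((out.length : Int) + 1)),
                  ("title", pvB_rstripColon lines[i]),
                  ("content", PySem.Str.strip (PySem.Str.join "\n"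
                      (PySem.List.slice lines (some ((i : Int) + 1)) (some ((pvB_skip lines (i + 1) : Nat) : Int)))))]])
        (by
          rw [pvB_skip_eq]
          have h2 := pvTakeWhile_len_le (lines.drop (i + 1)) (fun x => !pvB_isTitle x)
          simp only [List.length_drop] at h2
          omega)
        (fun h' => pvB_skip_title lines (i + 1) h')
    rw [hrec, hdrop, pvChunks_cons_title _ _ ht]
    rw [show pvChunks (lines.drop (i + 1)) = pvChunks (lines.drop (pvB_skip lines (i + 1))) by
      rw [pvB_skip_drop, pvChunks_dropWhile]]
    simp only [pvRender, hslice, pvA_mk, List.append_assoc, List.singleton_append, List.length_append,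
      List.length_cons, List.length_nil]
    congr 2
  · rename_i h
    rw [List.drop_eq_nil_of_le (by omega)]
    simp [pvChunks, pvAux, pvRender]
termination_by lines.length - i
decreasing_by have := pvB_skip_ge lines (i + 1); omega

-- ===== VERDICT (by name: the statement is the Claim_ definition above) =====
theorem parse_subsections_spec : Claim_equal_parse_subsections := by
  intro sc sn _
  show parse_subsections sc sn = parse_subsections_alt sc sn
  have hA : parse_subsections sc sn
      = pvFinish sn ((((PySem.Str.split? sc "\n").getD [])).foldl (pvA_step sn) ([], none, [], 1)) := rfl
  rw [hA, pvFold_raw]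
  have hfn := pvFold_none sn (pvB_lines sc) [] 1
  rw [show (((PySem.Str.split? sc "\n").getD []).map PySem.Str.strip).filter (fun ls => !(ls == ""))
      = pvB_lines sc from rfl, hfn]
  have hB : parse_subsections_alt sc sn
      = pvB_loop (pvB_lines sc) sn (pvB_skip (pvB_lines sc) 0) [] := rfl
  rw [hB, pvLoop_eq (pvB_lines sc) sn (pvB_skip (pvB_lines sc) 0) []
      (by
        rw [pvB_skip_eq]
        have h2 := pvTakeWhile_len_le ((pvB_lines sc).drop 0) (fun x => !pvB_isTitle x)
        simp only [List.length_drop] at h2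
        omega)
      (fun h' => pvB_skip_title (pvB_lines sc) 0 h')]
  rw [pvB_skip_drop (pvB_lines sc) 0]
  simp [pvChunks_dropWhile]
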